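-- pv_equiv track=rewrite | github.com/daniel-reich/ubiquitous-fiesta | ANdoCvhhaEibypkDE_14.py | closing_in_sum
-- ===== SOURCE A (Python) =====
-- def closing_in_sum(n):
--   nums = list(map(int, str(n)))
--   total = 0
--   while len(nums) > 1:
--     total += nums.pop()
--     total += nums.pop(0)*10
--   if nums:
--     total += nums.pop()
--   return total
-- ===== SOURCE B (Python) =====
-- def closing_in_sum(n):
--   digits = list(map(int, str(n)))
--   k = len(digits)
--   return sum(d * 10 if i < k // 2 else d for i, d in enumerate(digits))
-- ===== Notes on version B (the rewrite author's own statement) =====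
-- stated objective: simpler
-- what changed: Replaces the destructive two-ended pop loop by a single forward position-based pass: digits in the first half of the number are multiplied by ten, the remaining digits (including a middle digit) are added as-is.
import Mathlib
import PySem

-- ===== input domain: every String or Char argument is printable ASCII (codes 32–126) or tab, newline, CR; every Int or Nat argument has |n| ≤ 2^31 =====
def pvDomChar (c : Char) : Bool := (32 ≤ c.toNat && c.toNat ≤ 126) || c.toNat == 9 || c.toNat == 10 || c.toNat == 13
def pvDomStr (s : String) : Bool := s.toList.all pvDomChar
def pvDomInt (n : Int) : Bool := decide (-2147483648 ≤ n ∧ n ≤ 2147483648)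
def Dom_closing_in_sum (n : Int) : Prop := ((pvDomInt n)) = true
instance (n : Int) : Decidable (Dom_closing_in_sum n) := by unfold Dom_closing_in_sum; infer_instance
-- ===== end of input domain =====

-- B replaces A's destructive two-ended pop loop by one forward pass (index < k//2 → digit*10, else digit): simpler.
-- Both raise ValueError on negative n (int('-')); Pre_ is 0 ≤ n.

-- ===== PORT A =====
-- digits of n via str(n), as in 'list(map(int, str(n)))'; for n ≥ 0 each char is a digit, so int() never raises
def pvDigits (n : Int) : List Int :=
  (PySem.Int.toChars n).map (fun c => (PySem.Int.ofStr? (String.ofList [c])).getD 0)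

-- the while loop: 'while len(nums) > 1: total += nums.pop(); total += nums.pop(0)*10'
def pvWhileA : List Int → Int → List Int × Int
  | nums, total =>
    if h : 1 < nums.length then
      pvWhileA nums.dropLast.tail (total + nums.getLastD 0 + nums.dropLast.headD 0 * 10)
    else
      (nums, total)
  termination_by nums _ => nums.length
  decreasing_by simp [List.length_tail]; omega

def closing_in_sum (n : Int) : Int :=
  let nums := pvDigits n
  let p := pvWhileA nums 0
  match p.1 with
  | [] => p.2
  | _ => p.2 + p.1.getLastD 0    -- 'if nums: total += nums.pop()'

-- ===== PORT B =====
def closing_in_sum_alt (n : Int) : Int :=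
  let digits := pvDigits n
  let k : Int := digits.length
  (PySem.List.enumerate digits).foldl
    (fun acc p => acc + (if p.1 < PySem.Int.floordiv k 2 then p.2 * 10 else p.2)) 0

-- ===== PRECONDITION & SPEC =====
-- Pre_ excludes negative n, on which both Pythons raise ValueError (int('-') on the sign character).
def Pre_closing_in_sum (n : Int) : Prop := 0 ≤ n
instance (n : Int) : Decidable (Pre_closing_in_sum n) := by unfold Pre_closing_in_sum; infer_instance
def pvWitness_closing_in_sum : Int := (2019)

def Spec_closing_in_sum (n : Int) (out : Int) : Prop := out = closing_in_sum_alt n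
instance (n : Int) (out : Int) : Decidable (Spec_closing_in_sum n out) := by unfold Spec_closing_in_sum; infer_instance

-- ===== CLAIM (what is proved, stated in full; the proofs are below) =====
def Claim_equal_closing_in_sum : Prop := ∀ (n : Int), Dom_closing_in_sum n → Pre_closing_in_sum n → Spec_closing_in_sum n (closing_in_sum n)

-- ===== LEMMAS AND PROOFS =====

-- position-indexed digit sum: digit at index i gets ×10 iff i < k/2
def hsum (k : Nat) : Nat → List Int → Int
  | _, [] => 0
  | i, d :: ds => (if i < k / 2 then d * 10 else d) + hsum k (i + 1) ds

theorem fold_enum (ds : List Int) (k : Nat) :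
    ∀ (i : Nat) (t : Int),
      (PySem.List.enumerate ds (i : Int)).foldl
        (fun acc p => acc + (if p.1 < (k : Int) / 2 then p.2 * 10 else p.2)) t
        = t + hsum k i ds := by
  induction ds with
  | nil => intro i t; simp [PySem.List.enumerate_nil, hsum]
  | cons d ds ih =>
    intro i t
    rw [PySem.List.enumerate_cons]
    simp only [List.foldl_cons]
    have : ((i : Int) + 1) = ((i + 1 : Nat) : Int) := by push_cast; ring
    rw [this, ih]
    have hiff : ((i : Int) < (k : Int) / 2) ↔ (i < k / 2) := by omega
    simp only [hsum]
    by_cases hc : i < k / 2 <;> simp [hc, hiff] <;> ring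

theorem shift_lemma (b : Int) (m : Nat) :
    ∀ (l : List Int) (i : Nat), i + l.length = m →
      hsum (m + 2) (i + 1) (l ++ [b]) = b + hsum m i l := by
  intro l
  induction l with
  | nil =>
    intro i hi
    simp only [List.length_nil] at hi
    simp only [List.nil_append, hsum]
    have hno : ¬ (i + 1 < (m + 2) / 2) := by omega
    have hno2 : ¬ (i < m / 2) := by omega
    simp [hno2]
  | cons d ds ih =>
    intro i hi
    simp only [List.length_cons] at hi
    simp only [List.cons_append, hsum]
    rw [ih (i + 1) (by omega)]
    have hiff : (i + 1 < (m + 2) / 2) ↔ (i < m / 2) := by omega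
    by_cases hc : i < m / 2
    · rw [if_pos (hiff.mpr hc), if_pos hc]; ring
    · rw [if_neg (fun h => hc (hiff.mp h)), if_neg hc]; ring

-- the A-side loop + final pop, computed from state (nums, total)
def fA (nums : List Int) (t : Int) : Int :=
  let p := pvWhileA nums t
  match p.1 with
  | [] => p.2
  | _ => p.2 + p.1.getLastD 0

theorem pvWhileA_step (a b : Int) (l : List Int) (t : Int) :
    pvWhileA (a :: (l ++ [b])) t = pvWhileA l (t + b + a * 10) := by
  rw [pvWhileA]
  have h : 1 < (a :: (l ++ [b])).length := by simp
  rw [dif_pos h]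
  have h1 : (a :: (l ++ [b])).dropLast = a :: l := by
    rw [List.dropLast_cons_of_ne_nil (by simp), List.dropLast_concat]
  have h2 : (a :: (l ++ [b])).getLastD 0 = b := by
    have hg : (a :: (l ++ [b])).getLast? = some b :=
    (List.getLast?_concat : ((a :: l) ++ [b]).getLast? = some b)
    simp [List.getLastD_eq_getLast?, hg]
  rw [h1, h2]
  simp

theorem pvWhileA_base (nums : List Int) (t : Int) (h : ¬ 1 < nums.length) :
    pvWhileA nums t = (nums, t) := by
  rw [pvWhileA, dif_neg h]

theorem fA_eq_hsum : ∀ (xs : List Int) (t : Int), fA xs t = t + hsum xs.length 0 xs := by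
  intro xs
  induction xs using List.bidirectionalRec with
  | nil =>
    intro t
    unfold fA
    rw [pvWhileA_base [] t (by simp)]
    simp [hsum]
  | singleton a =>
    intro t
    unfold fA
    rw [pvWhileA_base [a] t (by simp)]
    simp [hsum]
  | cons_append a l b ih =>
    intro t
    have : fA (a :: (l ++ [b])) t = fA l (t + b + a * 10) := by
      simp only [fA, pvWhileA_step]
    rw [this, ih]
    have hlen : (a :: (l ++ [b])).length = l.length + 2 := by simp
    rw [hlen]
    have hmain : hsum (l.length + 2) 0 (a :: (l ++ [b]))
        = (if 0 < (l.length + 2) / 2 then a * 10 else a)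
          + hsum (l.length + 2) 1 (l ++ [b]) := by
      simp [hsum]
    rw [hmain, shift_lemma b l.length l 0 (by omega)]
    have hpos : 0 < (l.length + 2) / 2 := by omega
    rw [if_pos hpos]; ring

-- ===== VERDICT (by name: the statement is the Claim_ definition above) =====
theorem closing_in_sum_spec : Claim_equal_closing_in_sum := by
  intro n _ _
  unfold Spec_closing_in_sum
  have hflo : PySem.Int.floordiv ((pvDigits n).length : Int) 2 = ((pvDigits n).length : Int) / 2 :=
    PySem.Int.floordiv_eq_ediv_of_pos (by omega)
  have h2 := fold_enum (pvDigits n) (pvDigits n).length 0 0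
  simp only [Nat.cast_zero] at h2
  show fA (pvDigits n) 0 =
    (PySem.List.enumerate (pvDigits n)).foldl
      (fun acc p => acc + (if p.1 < PySem.Int.floordiv ((pvDigits n).length : Int) 2 then p.2 * 10 else p.2)) 0
  simp only [hflo]
  rw [fA_eq_hsum, h2]
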